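-- pv_equiv track=rewrite | github.com/bjayadikary/sentiment_analysis_of_nepali_news_headlines | preparing_models/my_stemmer.py | arrange_suffix
-- ===== SOURCE A (Python) =====
-- def arrange_suffix(suffixes_list):
--     # Creating a dictionary based on the length of suffix
--     suffixes = {}
--     for suffix in suffixes_list:
--         suffix_length = len(suffix)
--         if suffix_length not in suffixes:
--             suffixes[suffix_length] = [suffix]
--         else:
--             if suffix not in suffixes[suffix_length]:
--                 suffixes[suffix_length] += [suffix]
--
--     return suffixes
-- ===== SOURCE B (Python) =====
-- def arrange_suffix(suffixes_list):
--     # Pass 1: group by length, keeping duplicates.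
--     groups = {}
--     for s in suffixes_list:
--         groups.setdefault(len(s), []).append(s)
--     # Pass 2: rebuild each group without duplicates (first occurrence wins).
--     result = {}
--     for length, group in groups.items():
--         deduped = []
--         for s in group:
--             if s not in deduped:
--                 deduped.append(s)
--         result[length] = deduped
--     return result
-- ===== Notes on version B (the rewrite author's own statement) =====
-- stated objective: alternative
-- what changed: Replaces A's single interleaved pass (dedup-while-grouping) by two passes: first group all suffixes by length keeping duplicates, then rebuild each group list removing duplicates in first-occurrence order.
import Mathlib
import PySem

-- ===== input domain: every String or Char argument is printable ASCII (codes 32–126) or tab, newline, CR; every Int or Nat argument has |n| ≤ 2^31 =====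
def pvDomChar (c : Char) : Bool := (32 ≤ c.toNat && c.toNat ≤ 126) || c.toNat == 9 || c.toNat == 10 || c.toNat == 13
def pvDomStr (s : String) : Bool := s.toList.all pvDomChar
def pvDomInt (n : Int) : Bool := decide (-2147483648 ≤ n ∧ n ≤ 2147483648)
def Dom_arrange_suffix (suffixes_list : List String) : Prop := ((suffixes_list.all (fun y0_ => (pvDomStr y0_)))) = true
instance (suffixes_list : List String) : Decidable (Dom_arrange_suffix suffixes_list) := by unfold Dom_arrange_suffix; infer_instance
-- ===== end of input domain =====

-- B groups by length in one pass keeping duplicates, then dedups each bucket in a second pass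
-- (same return value as A's interleaved dedup-while-grouping; objective: alternative decomposition).

-- ===== PORT A =====
def arrange_suffix (suffixes_list : List String) : List (Int × List String) :=
  (suffixes_list.foldl (fun suffixes suffix =>
      let suffix_length := PySem.Str.len suffix
      if suffixes.contains suffix_length = false then
        suffixes.insert suffix_length [suffix]
      else
        if suffix ∈ suffixes.getD suffix_length [] then suffixes
        else suffixes.insert suffix_length (suffixes.getD suffix_length [] ++ [suffix]))
    PySem.Dict.empty).items

-- ===== PORT B =====
-- inner loop of B's pass 2: rebuild a group list without duplicates
def dedupKeepFirst (group : List String) : List String :=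
  group.foldl (fun deduped s => if s ∈ deduped then deduped else deduped ++ [s]) []

def arrange_suffix_alt (suffixes_list : List String) : List (Int × List String) :=
  let groups := suffixes_list.foldl
      (fun groups s => groups.modify (PySem.Str.len s) [] (· ++ [s])) PySem.Dict.empty
  (groups.items.foldl (fun result p => result.insert p.1 (dedupKeepFirst p.2))
    PySem.Dict.empty).items

-- ===== PRECONDITION & SPEC =====
def Spec_arrange_suffix (suffixes_list : List String) (out : List (Int × List String)) : Prop := out = arrange_suffix_alt suffixes_list
instance (suffixes_list : List String) (out : List (Int × List String)) : Decidable (Spec_arrange_suffix suffixes_list out) := by unfold Spec_arrange_suffix; infer_instance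

-- ===== CLAIM (what is proved, stated in full; the proofs are below) =====
def Claim_equal_arrange_suffix : Prop := ∀ (suffixes_list : List String), Dom_arrange_suffix suffixes_list → Spec_arrange_suffix suffixes_list (arrange_suffix suffixes_list)

-- ===== LEMMAS AND PROOFS =====

-- A's loop step, named for the lemmas (let-free; definitionally equal to the port's lambda)
def stepA (d : PySem.Dict Int (List String)) (s : String) : PySem.Dict Int (List String) :=
  if d.contains (PySem.Str.len s) = false then
    d.insert (PySem.Str.len s) [s]
  else
    if s ∈ d.getD (PySem.Str.len s) [] then d
    else d.insert (PySem.Str.len s) (d.getD (PySem.Str.len s) [] ++ [s])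

theorem stepA_getD (d : PySem.Dict Int (List String)) (s : String) (k : Int) :
    (stepA d s).getD k [] =
      if PySem.Str.len s == k then
        (if s ∈ d.getD k [] then d.getD k [] else d.getD k [] ++ [s])
      else d.getD k [] := by
  unfold stepA
  generalize PySem.Str.len s = n
  by_cases hc : d.contains n = false
  · rw [if_pos hc, PySem.Dict.getD_insert]
    by_cases hk : n = k
    · subst hk
      rw [if_pos rfl, PySem.Dict.getD_of_not_contains d _ hc, beq_self_eq_true]
      simp
    · have hb : (n == k) = false := by simp [hk]
      rw [if_neg (fun h => hk h.symm), hb]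
      simp
  · rw [if_neg hc]
    by_cases hm : s ∈ d.getD n []
    · rw [if_pos hm]
      by_cases hk : n = k
      · subst hk; rw [beq_self_eq_true]; simp [hm]
      · have hb : (n == k) = false := by simp [hk]
        rw [hb]; simp
    · rw [if_neg hm, PySem.Dict.getD_insert]
      by_cases hk : n = k
      · subst hk; rw [if_pos rfl, beq_self_eq_true]; simp [hm]
      · have hb : (n == k) = false := by simp [hk]
        rw [if_neg (fun h => hk h.symm), hb]
        simp

theorem stepA_keys (d : PySem.Dict Int (List String)) (s : String) :
    (stepA d s).keys = PySem.Set.add d.keys (PySem.Str.len s) := by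
  unfold stepA
  generalize PySem.Str.len s = n
  by_cases hc : d.contains n = false
  · have hnm : n ∉ d.keys := by
      intro h
      rw [← PySem.Dict.contains_iff_mem_keys] at h
      rw [h] at hc; cases hc
    rw [if_pos hc, PySem.Dict.keys_insert_of_not_contains d _ hc,
      PySem.Set.add_of_not_mem hnm]
  · have hc' : d.contains n = true := by
      cases h : d.contains n with
      | false => exact absurd h hc
      | true => rfl
    have hmem : n ∈ d.keys := (PySem.Dict.contains_iff_mem_keys _ _).mp hc'
    rw [if_neg hc, PySem.Set.add_of_mem hmem]
    by_cases hm : s ∈ d.getD n []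
    · rw [if_pos hm]
    · rw [if_neg hm, PySem.Dict.keys_insert_of_contains d _ hc']

theorem foldA_getD (l : List String) (d : PySem.Dict Int (List String)) (k : Int) :
    (l.foldl stepA d).getD k [] =
      (l.filter (fun s => PySem.Str.len s == k)).foldl
        (fun acc s => if s ∈ acc then acc else acc ++ [s]) (d.getD k []) := by
  induction l generalizing d with
  | nil => rfl
  | cons s l ih =>
    rw [List.foldl_cons, ih, stepA_getD, List.filter_cons]
    by_cases hk : (PySem.Str.len s == k) = true
    · rw [if_pos hk, if_pos hk, List.foldl_cons]
    · rw [if_neg hk, if_neg hk]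

theorem foldA_keys (l : List String) (d : PySem.Dict Int (List String)) :
    (l.foldl stepA d).keys = PySem.Set.update d.keys (l.map PySem.Str.len) := by
  rw [PySem.Set.update_map_eq_foldl_add]
  induction l generalizing d with
  | nil => rfl
  | cons s l ih => rw [List.foldl_cons, List.foldl_cons, ih, stepA_keys]

-- B's pass-1 dict: keys and values
theorem foldB_keys (l : List String) :
    (l.foldl (fun groups s => groups.modify (PySem.Str.len s) [] (· ++ [s]))
      (PySem.Dict.empty : PySem.Dict Int (List String))).keys
      = PySem.Set.update ([] : List Int) (l.map PySem.Str.len) := by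
  rw [PySem.Dict.keys_foldl_modify_key l PySem.Str.len []
    (fun _ s v => v ++ [s]) PySem.Dict.empty]
  rfl

theorem foldB_getD (l : List String) (k : Int) :
    (l.foldl (fun groups s => groups.modify (PySem.Str.len s) [] (· ++ [s]))
      (PySem.Dict.empty : PySem.Dict Int (List String))).getD k []
      = l.filter (fun s => PySem.Str.len s == k) := by
  have h : l.foldl (fun groups s => groups.modify (PySem.Str.len s) [] (· ++ [s]))
      (PySem.Dict.empty : PySem.Dict Int (List String))
      = (l.map (fun s => (PySem.Str.len s, s))).foldl
          (fun d p => d.modify p.1 [] (· ++ [p.2])) PySem.Dict.empty := by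
    rw [List.foldl_map]
  rw [h, PySem.Dict.getD_foldl_modify_append]
  simp [List.filter_map, Function.comp_def]

theorem arrange_suffix_eq_alt (l : List String) :
    arrange_suffix l = arrange_suffix_alt l := by
  unfold arrange_suffix arrange_suffix_alt
  set groups := l.foldl (fun groups s => groups.modify (PySem.Str.len s) [] (· ++ [s]))
      (PySem.Dict.empty : PySem.Dict Int (List String)) with hgroups
  have hkeysB : groups.keys = PySem.Set.update ([] : List Int) (l.map PySem.Str.len) := by
    rw [hgroups, foldB_keys]
  have hnodupB : groups.keys.Nodup := by
    rw [hkeysB]; exact PySem.Set.nodup_update _ _ List.nodup_nil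
  have hA : l.foldl (fun suffixes suffix =>
      let suffix_length := PySem.Str.len suffix
      if suffixes.contains suffix_length = false then
        suffixes.insert suffix_length [suffix]
      else
        if suffix ∈ suffixes.getD suffix_length [] then suffixes
        else suffixes.insert suffix_length (suffixes.getD suffix_length [] ++ [suffix]))
      (PySem.Dict.empty : PySem.Dict Int (List String)) = l.foldl stepA PySem.Dict.empty := rfl
  rw [hA]
  have hkeysA : (l.foldl stepA PySem.Dict.empty).keys
      = PySem.Set.update ([] : List Int) (l.map PySem.Str.len) := by
    rw [foldA_keys]; rfl
  have hnodupA : (l.foldl stepA PySem.Dict.empty).keys.Nodup := by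
    rw [hkeysA]; exact PySem.Set.nodup_update _ _ List.nodup_nil
  -- right side: the insert loop over fresh distinct keys appends
  have hfresh : (groups.items.foldl (fun result p => result.insert p.1 (dedupKeepFirst p.2))
      (PySem.Dict.empty : PySem.Dict Int (List String))).items
      = PySem.Dict.empty.items ++ groups.items.map (fun p => (p.1, dedupKeepFirst p.2)) :=
    PySem.Dict.items_foldl_insert_fresh groups.items (fun p => p.1)
      (fun p => dedupKeepFirst p.2) PySem.Dict.empty
      (fun _ _ => rfl) hnodupB
  rw [hfresh]
  have hemp : (PySem.Dict.empty : PySem.Dict Int (List String)).items = [] := rfl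
  rw [hemp, List.nil_append]
  rw [PySem.Dict.items_eq_map_keys (l.foldl stepA PySem.Dict.empty) hnodupA ([] : List String)]
  rw [PySem.Dict.items_eq_map_keys groups hnodupB ([] : List String)]
  rw [List.map_map, hkeysA, hkeysB]
  apply List.map_congr_left
  intro k _
  simp only [Function.comp_apply]
  rw [foldA_getD, foldB_getD]
  rfl

-- ===== VERDICT (by name: the statement is the Claim_ definition above) =====
theorem arrange_suffix_spec : Claim_equal_arrange_suffix := by
  intro l _
  unfold Spec_arrange_suffix
  exact arrange_suffix_eq_alt l
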